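-- pv_equiv track=rewrite | github.com/Sheriffy4/recon | profile_real_domain_tester.py | create_test_domains
-- ===== SOURCE A (Python) =====
-- from typing import List, Dict, Any
--
-- def create_test_domains(count: int = 10) -> List[str]:
--     """Create test domains for profiling."""
--     # Use well-known domains that should resolve quickly
--     base_domains = [
--         "google.com",
--         "cloudflare.com",
--         "github.com",
--         "microsoft.com",
--         "amazon.com",
--         "facebook.com",
--         "twitter.com",
--         "linkedin.com",
--         "stackoverflow.com",
--         "reddit.com"
--     ]
--
--     # Repeat if needed
--     domains = []
--     while len(domains) < count:
--         domains.extend(base_domains)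
--
--     return domains[:count]
-- ===== SOURCE B (Python) =====
-- from typing import List, Dict, Any
--
-- def create_test_domains(count: int = 10) -> List[str]:
--     """Create test domains for profiling."""
--     base_domains = [
--         "google.com",
--         "cloudflare.com",
--         "github.com",
--         "microsoft.com",
--         "amazon.com",
--         "facebook.com",
--         "twitter.com",
--         "linkedin.com",
--         "stackoverflow.com",
--         "reddit.com"
--     ]
--     n = len(base_domains)
--     return [base_domains[i % n] for i in range(count)]
-- ===== Notes on version B (the rewrite author's own statement) =====
-- stated objective: idiomatic
-- what changed: Replaced the while-loop that extends whole base-list chunks and then slices with a single comprehension that picks each element directly by modulo indexing over range(count).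
import Mathlib
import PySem

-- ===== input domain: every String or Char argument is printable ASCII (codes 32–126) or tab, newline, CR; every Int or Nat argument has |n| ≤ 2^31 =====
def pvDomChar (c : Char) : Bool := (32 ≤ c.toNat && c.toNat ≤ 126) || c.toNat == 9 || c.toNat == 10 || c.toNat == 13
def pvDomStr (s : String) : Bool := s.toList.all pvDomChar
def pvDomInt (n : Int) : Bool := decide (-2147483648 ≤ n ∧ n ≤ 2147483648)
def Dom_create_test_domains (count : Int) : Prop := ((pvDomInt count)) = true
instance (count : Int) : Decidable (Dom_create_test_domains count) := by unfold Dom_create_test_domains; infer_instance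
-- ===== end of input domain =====

-- B replaces A's chunk-extend-then-slice while-loop by a direct modulo-indexed comprehension; objective: idiomatic.

-- ===== PORT A =====
def pvBaseA : List String :=
  ["google.com", "cloudflare.com", "github.com", "microsoft.com", "amazon.com",
   "facebook.com", "twitter.com", "linkedin.com", "stackoverflow.com", "reddit.com"]

-- the 'while len(domains) < count: domains.extend(base_domains)' loop
def pvLoopA (count : Int) (domains : List String) : List String :=
  if (domains.length : Int) < count then pvLoopA count (domains ++ pvBaseA) else domains
termination_by count.toNat - domains.length
decreasing_by
  have h10 : pvBaseA.length = 10 := rfl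
  simp only [List.length_append, h10]
  omega

def create_test_domains (count : Int) : List String :=
  PySem.List.slice (pvLoopA count []) none (some count)

-- ===== PORT B =====
def pvBaseB : List String :=
  ["google.com", "cloudflare.com", "github.com", "microsoft.com", "amazon.com",
   "facebook.com", "twitter.com", "linkedin.com", "stackoverflow.com", "reddit.com"]

-- [base_domains[i % n] for i in range(count)], n = len(base_domains)
def create_test_domains_alt (count : Int) : List String :=
  (PySem.List.pyRange 0 count 1).map
    (fun i => PySem.List.pyGetD pvBaseB (PySem.Int.mod i (pvBaseB.length : Int)) "")

-- ===== PRECONDITION & SPEC =====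
def Spec_create_test_domains (count : Int) (out : List String) : Prop := out = create_test_domains_alt count
instance (count : Int) (out : List String) : Decidable (Spec_create_test_domains count out) := by unfold Spec_create_test_domains; infer_instance

-- ===== CLAIM (what is proved, stated in full; the proofs are below) =====
def Claim_equal_create_test_domains : Prop := ∀ (count : Int), Dom_create_test_domains count → Spec_create_test_domains count (create_test_domains count)

-- ===== LEMMAS AND PROOFS =====

-- proof-side helpers: 'rep k' = base_domains repeated k times; 'needed m' = ceil(m/10) clamped at 0
def pvRep : Nat → List String
  | 0 => []
  | k + 1 => pvBaseA ++ pvRep k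

def pvNeeded (m : Int) : Nat := (m + 9).toNat / 10

theorem pvLoopA_eq_rep : ∀ (n : Nat) (count : Int) (acc : List String),
    pvNeeded (count - acc.length) = n → pvLoopA count acc = acc ++ pvRep n := by
  intro n
  induction n with
  | zero =>
    intro count acc h
    simp only [pvNeeded] at h
    have hle : count - (acc.length : Int) ≤ 0 := by
      by_contra hc
      have : 10 ≤ (count - (acc.length : Int) + 9).toNat := by omega
      have := Nat.one_le_div_iff (by norm_num : 0 < 10) |>.mpr this
      omega
    rw [pvLoopA, if_neg (by omega)]
    simp [pvRep]
  | succ n ih =>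
    intro count acc h
    simp only [pvNeeded] at h
    have hm : 1 ≤ count - (acc.length : Int) := by
      by_contra hc
      have h9 : (count - (acc.length : Int) + 9).toNat < 10 := by omega
      rw [Nat.div_eq_of_lt h9] at h; omega
    have hsplit : (count - (acc.length : Int) + 9).toNat
        = (count - (acc.length : Int) - 1).toNat + 10 := by omega
    rw [hsplit, Nat.add_div_right _ (by norm_num)] at h
    have h10 : pvBaseA.length = 10 := rfl
    have hih : pvLoopA count (acc ++ pvBaseA) = (acc ++ pvBaseA) ++ pvRep n := by
      apply ih
      simp only [pvNeeded, List.length_append, h10]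
      have : (count - ((acc.length + 10 : Nat) : Int) + 9) = count - (acc.length : Int) - 1 := by
        push_cast; ring
      rw [this]; omega
    rw [pvLoopA, if_pos (by omega), hih]
    simp [pvRep]

theorem pvRep_take : ∀ (k n : Nat), n ≤ 10 * k →
    (pvRep k).take n = (List.range n).map (fun i => pvBaseA.getD (i % 10) "") := by
  intro k
  induction k with
  | zero =>
    intro n h
    have : n = 0 := by omega
    subst this; rfl
  | succ k ih =>
    intro n h
    by_cases hn : n ≤ 10
    · rw [show pvRep (k + 1) = pvBaseA ++ pvRep k from rfl,
        List.take_append_of_le_length (by exact hn)]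
      interval_cases n <;> rfl
    · have hn' : n = 10 + (n - 10) := by omega
      rw [hn', show pvRep (k + 1) = pvBaseA ++ pvRep k from rfl, List.take_append]
      have h10 : pvBaseA.length = 10 := rfl
      rw [List.range_add, List.map_append, List.map_map]
      have h1 : List.take (10 + (n - 10)) pvBaseA = pvBaseA := by
        apply List.take_of_length_le; omega
      have h2 : (List.range 10).map (fun i => pvBaseA.getD (i % 10) "") = pvBaseA := by rfl
      rw [h1, h2, h10]
      congr 1
      · rw [show 10 + (n - 10) - 10 = n - 10 from by omega, ih (n - 10) (by omega)]
        apply List.map_congr_left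
        intro i _
        simp [Nat.add_mod_left]

theorem pvNeeded_ge (count : Int) (_h : 0 ≤ count) : count.toNat ≤ 10 * pvNeeded count := by
  simp only [pvNeeded]
  have hdm := Nat.div_add_mod ((count + 9).toNat) 10
  have hmod := Nat.mod_lt ((count + 9).toNat) (by norm_num : 0 < 10)
  omega

theorem create_test_domains_eq (count : Int) :
    create_test_domains count = create_test_domains_alt count := by
  unfold create_test_domains create_test_domains_alt
  rw [pvLoopA_eq_rep (pvNeeded count) count [] (by simp)]
  simp only [List.nil_append]
  by_cases hc : count ≤ 0
  · have h0 : pvNeeded count = 0 := by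
      simp only [pvNeeded]; rw [Nat.div_eq_of_lt (by omega)]
    rw [h0, PySem.List.pyRange_one_eq_nil hc]
    simp [pvRep, PySem.List.slice]
  · obtain ⟨n, rfl⟩ := Int.eq_ofNat_of_zero_le (by omega : (0:Int) ≤ count)
    rw [PySem.List.slice_to_natCast, PySem.List.pyRange_zero_natCast, List.map_map]
    rw [pvRep_take (pvNeeded n) n (by have := pvNeeded_ge n (by omega); omega)]
    apply List.map_congr_left
    intro i _
    have hlen : (pvBaseB.length : Int) = ((10 : Nat) : Int) := rfl
    simp only [Function.comp, hlen, PySem.Int.mod_natCast, PySem.List.pyGetD_natCast]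
    rfl

-- ===== VERDICT (by name: the statement is the Claim_ definition above) =====
theorem create_test_domains_spec : Claim_equal_create_test_domains := by
  intro count _
  unfold Spec_create_test_domains
  exact create_test_domains_eq count
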